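-- pv_equiv track=rewrite | github.com/pypi-data/pypi-mirror-186 | packages/dataclass-to-diagram/dataclass_to_diagram-0.0.5-py3-none-any.whl/dataclass_to_diagram/exporters/state_to_puml/state_to_puml.py | _export_description
-- ===== SOURCE A (Python) =====
-- DESC_LINE_TEMPLATE: str = "{alias} : {description_line}"
--
-- def _export_description(
--     state_alias: int,
--     description: str | None,
-- ) -> str:
--     if not description:
--         return ""
--     desc_lines = description.split("\n")
--     desc_lines_format = [
--         DESC_LINE_TEMPLATE.format(
--             alias=state_alias,
--             description_line=line,
--         )
--         for line in desc_lines
--     ]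
--     desc_lines_str = "\n".join(desc_lines_format)
--     return "\n{0}".format(desc_lines_str)
-- ===== SOURCE B (Python) =====
-- def _export_description(state_alias, description):
--     if not description:
--         return ""
--     prefix = f"{state_alias} : "
--     out = ["\n", prefix]
--     for ch in description:
--         out.append(ch)
--         if ch == "\n":
--             out.append(prefix)
--     return "".join(out)
-- ===== Notes on version B (the rewrite author's own statement) =====
-- stated objective: alternative
-- what changed: Replaces A's split-into-lines / per-line format / join pipeline by a single character-level pass that emits each character and injects the alias prefix right after every newline.
import Mathlib
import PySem

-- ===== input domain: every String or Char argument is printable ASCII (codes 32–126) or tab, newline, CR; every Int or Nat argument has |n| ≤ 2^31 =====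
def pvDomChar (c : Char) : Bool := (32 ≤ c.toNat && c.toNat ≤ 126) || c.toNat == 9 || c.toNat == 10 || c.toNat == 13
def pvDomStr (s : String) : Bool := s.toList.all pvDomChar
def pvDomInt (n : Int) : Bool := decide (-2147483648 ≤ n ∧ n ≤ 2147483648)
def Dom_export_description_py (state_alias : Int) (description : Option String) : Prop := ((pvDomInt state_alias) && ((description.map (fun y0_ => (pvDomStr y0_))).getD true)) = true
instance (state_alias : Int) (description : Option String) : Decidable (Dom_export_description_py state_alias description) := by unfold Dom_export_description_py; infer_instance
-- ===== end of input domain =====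

-- B replaces A's split-into-lines / per-line format / join pipeline by one character-level
-- pass that copies each character and injects the alias prefix after every newline; objective: alternative.

-- ===== PORT A =====
-- literal port of A: split on "\n", format each line with the template, join, prepend "\n".
def export_description_py (state_alias : Int) (description : Option String) : String :=
  match description with
  | none => ""
  | some d =>
    if d = "" then ""  -- `if not description`
    else
      let desc_lines := (PySem.Str.split? d "\n").getD []  -- sep "\n" ≠ "", split? is some here
      let desc_lines_format := desc_lines.map (fun line =>
        PySem.Str.join "" [PySem.Int.toStr state_alias, " : ", line])  -- DESC_LINE_TEMPLATE.format
      let desc_lines_str := PySem.Str.join "\n" desc_lines_format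
      PySem.Str.join "" ["\n", desc_lines_str]  -- "\n{0}".format

-- ===== PORT B =====
-- single pass over the characters, accumulating string pieces, joined once at the end.
def export_description_py_alt (state_alias : Int) (description : Option String) : String :=
  match description with
  | none => ""
  | some d =>
    if d = "" then ""  -- `if not description`
    else
      let prefix_ := String.ofList ((PySem.Int.toStr state_alias).toList ++ " : ".toList)  -- f"{state_alias} : "
      let out := d.toList.foldl (fun acc ch =>            -- for ch in description:
        let acc' := acc ++ [String.ofList [ch]]           --   out.append(ch)
        if ch = '\n' then acc' ++ [prefix_] else acc')    --   if ch == "\n": out.append(prefix)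
        ["\n", prefix_]
      PySem.Str.join "" out                               -- "".join(out)

-- ===== PRECONDITION & SPEC =====
def Spec_export_description_py (state_alias : Int) (description : Option String) (out : String) : Prop := out = export_description_py_alt state_alias description
instance (state_alias : Int) (description : Option String) (out : String) : Decidable (Spec_export_description_py state_alias description out) := by unfold Spec_export_description_py; infer_instance

-- ===== CLAIM (what is proved, stated in full; the proofs are below) =====
def Claim_equal_export_description_py : Prop := ∀ (state_alias : Int) (description : Option String), Dom_export_description_py state_alias description → Spec_export_description_py state_alias description (export_description_py state_alias description)

-- ===== LEMMAS AND PROOFS =====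

-- simple structural split on a single character (proof-side spec of Chars.splitOn on [c])
def split1 (c : Char) : List Char → List (List Char)
  | [] => [[]]
  | x :: t => if x = c then [] :: split1 c t else (split1 c t).modifyHead (x :: ·)

-- canonical middle form: copy each char, replacing c by `new` (both programs reduce to it)
def repl1 (c : Char) (new : List Char) : List Char → List Char
  | [] => []
  | x :: t => if x = c then new ++ repl1 c new t else x :: repl1 c new t

theorem split1_ne_nil (c : Char) (l : List Char) : split1 c l ≠ [] := by
  cases l with
  | nil => simp [split1]
  | cons x t =>
    simp only [split1]
    split_ifs
    · simp
    · cases h : split1 c t with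
      | nil => exact absurd h (split1_ne_nil c t)
      | cons a b => simp

theorem go_split (c : Char) : ∀ (fuel : Nat) (l cur : List Char) (pacc : List (List Char)),
    l.length < fuel →
    PySem.Chars.splitOn.go [c] fuel l cur pacc = pacc.reverse ++ (split1 c l).modifyHead (cur.reverse ++ ·) := by
  intro fuel
  induction fuel with
  | zero => intro l cur pacc h; omega
  | succ n ih =>
    intro l cur pacc h
    cases l with
    | nil => simp [PySem.Chars.splitOn.go, split1]
    | cons x t =>
      simp only [PySem.Chars.splitOn.go, List.isPrefixOf, List.length_cons] at *
      by_cases hx : c = x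
      · subst hx
        simp only [beq_self_eq_true, Bool.true_and, if_true, List.drop_succ_cons,
          List.length_nil, List.drop_zero, split1]
        rw [ih t [] (cur.reverse :: pacc) (by omega)]
        cases hs : split1 c t with
        | nil => exact absurd hs (split1_ne_nil c t)
        | cons a b => simp
      · have hb : (c == x) = false := by simp [hx]
        simp only [hb, Bool.false_and, if_neg (by simp : ¬ (false = true)), split1]
        rw [ih t (x :: cur) pacc (by omega)]
        cases hs : split1 c t with
        | nil => exact absurd hs (split1_ne_nil c t)
        | cons a b =>
          have hxc : ¬ x = c := fun h' => hx h'.symm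
          simp [hxc]

theorem splitOn_eq (c : Char) (l : List Char) : PySem.Chars.splitOn l [c] = split1 c l := by
  unfold PySem.Chars.splitOn
  rw [go_split c (l.length + 1) l [] [] (by omega)]
  cases hs : split1 c l with
  | nil => exact absurd hs (split1_ne_nil c l)
  | cons a b => simp

theorem join_split1 (c : Char) (new l1 : List Char) :
    PySem.Chars.join new (split1 c l1) = repl1 c new l1 := by
  induction l1 with
  | nil => simp [split1, repl1, PySem.Chars.join, List.intercalate]
  | cons x t ih =>
    simp only [split1, repl1]
    by_cases hx : x = c
    · simp only [hx, if_true]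
      cases hs : split1 c t with
      | nil => exact absurd hs (split1_ne_nil c t)
      | cons a b =>
        rw [hs] at ih
        rw [PySem.Chars.join_cons_cons, ← ih]
        simp
    · simp only [if_neg hx]
      cases hs : split1 c t with
      | nil => exact absurd hs (split1_ne_nil c t)
      | cons a b =>
        rw [hs] at ih
        cases b with
        | nil => simp_all [PySem.Chars.join, List.intercalate]
        | cons p q =>
          simp only [List.modifyHead]
          rw [PySem.Chars.join_cons_cons, ← ih, PySem.Chars.join_cons_cons]
          simp

theorem join_map_prefix (sep pre : List Char) : ∀ (parts : List (List Char)), parts ≠ [] →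
    PySem.Chars.join sep (parts.map (pre ++ ·)) = pre ++ PySem.Chars.join (sep ++ pre) parts := by
  intro parts
  induction parts with
  | nil => intro h; exact absurd rfl h
  | cons a b ih =>
    intro _
    cases b with
    | nil => simp [PySem.Chars.join, List.intercalate]
    | cons p q =>
      rw [List.map_cons, List.map_cons, PySem.Chars.join_cons_cons, ← List.map_cons,
        ih (by simp), PySem.Chars.join_cons_cons]
      simp

theorem join_empty_flatten : ∀ (parts : List (List Char)),
    PySem.Chars.join [] parts = parts.flatten := by
  intro parts
  induction parts with
  | nil => simp [PySem.Chars.join, List.intercalate]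
  | cons a b ih =>
    cases b with
    | nil => simp [PySem.Chars.join, List.intercalate]
    | cons p q =>
      rw [PySem.Chars.join_cons_cons, ih]
      simp

-- B's fold, flattened, produces the canonical form appended to the flattened accumulator
theorem bfold_eq (pre : String) : ∀ (l : List Char) (acc : List String),
    ((l.foldl (fun acc ch =>
        if ch = '\n' then acc ++ [String.ofList [ch]] ++ [pre]
        else acc ++ [String.ofList [ch]]) acc).map String.toList).flatten
      = (acc.map String.toList).flatten ++ repl1 '\n' ('\n' :: pre.toList) l := by
  intro l
  induction l with
  | nil => intro acc; simp [repl1]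
  | cons x t ih =>
    intro acc
    simp only [List.foldl_cons, repl1]
    by_cases hx : x = '\n'
    · subst hx
      simp only [if_true]
      rw [ih]
      simp
    · simp only [if_neg hx]
      rw [ih]
      simp

-- ===== VERDICT (by name: the statement is the Claim_ definition above) =====
theorem export_description_py_spec : Claim_equal_export_description_py := by
  intro state_alias description _
  unfold Spec_export_description_py export_description_py export_description_py_alt
  cases description with
  | none => rfl
  | some d =>
    by_cases hd : d = ""
    · simp [hd]
    · simp only [if_neg hd]
      have cj3 : ∀ a b c : List Char, PySem.Chars.join [] [a, b, c] = a ++ (b ++ c) := by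
        intro a b c; simp [PySem.Chars.join, List.intercalate]
      have hnl : "\n".toList = ['\n'] := rfl
      have hemp : "".toList = ([] : List Char) := rfl
      have hsp : " : ".toList = [' ', ':', ' '] := rfl
      -- A side
      simp only [PySem.Str.join, PySem.Str.split?, hnl, hemp, hsp,
        PySem.Chars.split?, List.isEmpty_cons, Option.map_some, Option.getD_some,
        String.toList_ofList, List.map_cons, List.map_nil, List.map_map, cj3,
        if_neg (by simp : ¬ (false = true))]
      apply congrArg String.ofList
      rw [splitOn_eq]
      have hmap : List.map (String.toList ∘ (fun line => String.ofList
            ((PySem.Int.toStr state_alias).toList ++ ([' ', ':', ' '] ++ line.toList))) ∘ String.ofList)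
            (split1 '\n' d.toList)
          = List.map (fun l => ((PySem.Int.toStr state_alias).toList ++ [' ', ':', ' ']) ++ l)
            (split1 '\n' d.toList) := by
        simp [Function.comp_def]
      rw [hmap, join_map_prefix ['\n'] _ _ (split1_ne_nil '\n' d.toList),
        join_split1 '\n' (['\n'] ++ ((PySem.Int.toStr state_alias).toList ++ [' ', ':', ' '])) d.toList]
      -- B side
      simp only [join_empty_flatten, bfold_eq]
      simp
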